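-- pv_equiv track=rewrite | github.com/devirambudhathoki369/nnrfc | app/core/reports/views.py | keep_only_child_question
-- ===== SOURCE A (Python) =====
-- def keep_only_child_question(all_data):
--     prev_q = ""
--     for lst in all_data:
--         if prev_q == lst[0]:
--             lst[0] = ""
--         else:
--             prev_q = lst[0]
--     return all_data
-- ===== SOURCE B (Python) =====
-- def keep_only_child_question(all_data):
--     # staged: pass 1 snapshots all first cells; pass 2 compares each row's key
--     # with the PREVIOUS row's raw key (sentinel "" before the first row) and
--     # blanks it on equality -- no running prev_q state, no run detection.
--     firsts = [row[0] for row in all_data]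
--     for row, prev in zip(all_data, [""] + firsts):
--         if row[0] == prev:
--             row[0] = ""
--     return all_data
-- ===== Notes on version B (the rewrite author's own statement) =====
-- stated objective: alternative
-- what changed: Replaces the stateful prev_q scan with two staged passes: first snapshot the list of first cells, then blank each row whose key equals the previous row's raw key via a zip with the shifted key list (correct because A's prev_q always equals the previous row's original key).
-- outside the precondition, e.g. on keep_only_child_question([[]]): A raises IndexError, B raises IndexError
import Mathlib
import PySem

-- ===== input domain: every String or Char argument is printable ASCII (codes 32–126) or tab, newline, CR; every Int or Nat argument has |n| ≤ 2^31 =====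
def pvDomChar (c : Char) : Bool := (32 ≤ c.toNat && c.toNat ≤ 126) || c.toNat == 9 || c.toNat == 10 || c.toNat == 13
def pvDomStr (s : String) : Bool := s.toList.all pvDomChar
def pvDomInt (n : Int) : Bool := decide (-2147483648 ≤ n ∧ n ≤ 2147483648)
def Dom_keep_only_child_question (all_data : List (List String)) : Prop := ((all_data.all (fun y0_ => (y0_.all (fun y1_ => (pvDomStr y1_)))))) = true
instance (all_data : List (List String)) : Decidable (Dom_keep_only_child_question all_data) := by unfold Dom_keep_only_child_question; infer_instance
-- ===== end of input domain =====

-- B replaces A's stateful prev_q scan with two staged passes (snapshot the keys,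
-- then blank via a zip with the shifted key list); same cost, different decomposition.
-- Both Pythons mutate rows in place; the equivalence proved is about the return value.

-- ===== PORT A =====
-- single scan carrying prev_q; the 'none' branch (empty row) is Python's IndexError,
-- excluded by Pre_
def keepA (prev : String) : List (List String) → List (List String)
  | [] => []
  | lst :: rest =>
    match PySem.List.pyGet? lst 0 with
    | none => lst :: rest  -- IndexError in Python; unreachable under Pre_
    | some h =>
      if prev == h then ("" :: lst.tail) :: keepA prev rest
      else lst :: keepA h rest

def keep_only_child_question (all_data : List (List String)) : List (List String) :=
  keepA "" all_data

-- ===== PORT B =====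
-- pass 1: snapshot the first cell of every row ("" stands where Python raises
-- IndexError on an empty row, excluded by Pre_)
def firstsB (rows : List (List String)) : List String :=
  rows.map (fun r => match PySem.List.pyGet? r 0 with
    | some h => h
    | none => "")  -- IndexError in Python; unreachable under Pre_

-- pass 2: zip each row with the previous row's raw key and blank on equality
def keep_only_child_question_alt (all_data : List (List String)) : List (List String) :=
  List.zipWith
    (fun r prev => match PySem.List.pyGet? r 0 with
      | none => r  -- IndexError in Python; unreachable under Pre_
      | some h => if h == prev then "" :: r.tail else r)
    all_data ("" :: firstsB all_data)

-- ===== PRECONDITION & SPEC =====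
-- Pre_ excludes inputs containing an empty row, on which A raises IndexError (lst[0])
def Pre_keep_only_child_question (all_data : List (List String)) : Prop :=
  ∀ lst ∈ all_data, lst ≠ []
instance (all_data : List (List String)) : Decidable (Pre_keep_only_child_question all_data) := by
  unfold Pre_keep_only_child_question; infer_instance
def pvWitness_keep_only_child_question : List (List String) :=
  [["q1", "a"], ["q1", "b"], ["q2", "c"]]
def Spec_keep_only_child_question (all_data : List (List String)) (out : List (List String)) : Prop := out = keep_only_child_question_alt all_data
instance (all_data : List (List String)) (out : List (List String)) : Decidable (Spec_keep_only_child_question all_data out) := by unfold Spec_keep_only_child_question; infer_instance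

-- ===== CLAIM (what is proved, stated in full; the proofs are below) =====
def Claim_equal_keep_only_child_question : Prop := ∀ (all_data : List (List String)), Dom_keep_only_child_question all_data → Pre_keep_only_child_question all_data → Spec_keep_only_child_question all_data (keep_only_child_question all_data)

-- ===== LEMMAS AND PROOFS =====

-- invariant: A's scan with running key `prev` equals B's zip of the rows with
-- `prev` followed by the rows' own raw keys
theorem keepA_eq_zip (l : List (List String))
    (hl : ∀ lst ∈ l, lst ≠ []) (prev : String) :
    keepA prev l =
      List.zipWith
        (fun r p => match PySem.List.pyGet? r 0 with
          | none => r
          | some h => if h == p then "" :: r.tail else r)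
        l (prev :: firstsB l) := by
  induction l generalizing prev with
  | nil => simp [keepA]
  | cons lst rest ih =>
    have hne : lst ≠ [] := hl lst (by simp)
    obtain ⟨h, t, rfl⟩ : ∃ h t, lst = h :: t := by
      cases lst with
      | nil => exact absurd rfl hne
      | cons a b => exact ⟨a, b, rfl⟩
    have hrest : ∀ m ∈ rest, m ≠ [] := fun m hm => hl m (by simp [hm])
    simp only [keepA, firstsB, List.map_cons, List.zipWith_cons_cons,
      PySem.List.pyGet?_zero_cons]
    by_cases hk : prev = h
    · subst hk
      simp [ih hrest, firstsB]
    · have h1 : (prev == h) = false := by simp [hk]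
      have h2 : (h == prev) = false := by simp [Ne.symm hk]
      simp only [h1, h2, Bool.false_eq_true, if_false]
      rw [ih hrest h]
      simp [firstsB]

-- ===== VERDICT (by name: the statement is the Claim_ definition above) =====
theorem keep_only_child_question_spec : Claim_equal_keep_only_child_question := by
  intro all_data _ hpre
  unfold Spec_keep_only_child_question keep_only_child_question keep_only_child_question_alt
  exact keepA_eq_zip all_data hpre ""
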